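-- pv_equiv track=rewrite | github.com/FabioSansone/HV_scripts | Scripts/CRC32.py | crc323check
-- ===== SOURCE A (Python) =====
-- def crc32(word) -> int: # calcola il CRC di una riga da 32 bit del pacchetto
--     step_1 = (word >> 16) ^ (word & 0xFFFF)
--     step_2 = (step_1 >> 8) ^ (step_1 & 0xFF)
--     return (step_2 >> 4) ^ (step_2 & 0xF)
--
-- def crc323check(arr) -> bool:           # prende in input un array contenente le varie righe del
--     testvalue = ((arr[-1] >> 26) & 0xF) # pacchetto e verifica il CRC
--     crc = crc32(arr[0])
--     for i in range(1, len(arr)):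
--         if i != len(arr)-1:
--             crc = crc32(arr[i]) ^ crc
--         else:
--             crc = crc32((arr[i] & 0x3FFFFFF) + 0xC0000000) ^ crc
--     if crc == testvalue:
--         return True
--     else:
--         return False
-- ===== SOURCE B (Python) =====
-- def crc32(word) -> int:
--     step_1 = (word >> 16) ^ (word & 0xFFFF)
--     step_2 = (step_1 >> 8) ^ (step_1 & 0xFF)
--     return (step_2 >> 4) ^ (step_2 & 0xF)
--
-- def crc323check(arr) -> bool:
--     # crc32 is XOR-linear, so XOR the words first and call crc32 once
--     testvalue = (arr[-1] >> 26) & 0xF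
--     acc = arr[0]
--     if len(arr) > 1:
--         for w in arr[1:-1]:
--             acc ^= w
--         acc ^= (arr[-1] & 0x3FFFFFF) + 0xC0000000
--     return crc32(acc) == testvalue
-- ===== Notes on version B (the rewrite author's own statement) =====
-- stated objective: faster
-- what changed: B exploits that this crc32 is XOR-linear: it XOR-accumulates the raw words (transforming the last word when len>1) in one pass and applies crc32 once, instead of applying crc32 to every word inside an index loop.
-- outside the precondition, e.g. on crc323check([]): A raises IndexError, B raises IndexError
import Mathlib
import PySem

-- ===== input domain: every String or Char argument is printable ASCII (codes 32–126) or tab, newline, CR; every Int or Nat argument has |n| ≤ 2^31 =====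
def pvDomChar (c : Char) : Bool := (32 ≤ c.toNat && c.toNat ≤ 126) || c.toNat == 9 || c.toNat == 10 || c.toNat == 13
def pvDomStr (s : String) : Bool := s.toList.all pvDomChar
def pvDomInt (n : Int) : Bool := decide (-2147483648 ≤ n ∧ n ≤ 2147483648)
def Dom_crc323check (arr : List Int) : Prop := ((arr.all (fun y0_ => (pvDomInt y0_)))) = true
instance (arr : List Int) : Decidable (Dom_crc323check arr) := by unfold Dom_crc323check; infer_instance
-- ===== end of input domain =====

-- B XORs the raw words in one pass and applies crc32 once (crc32 here is XOR-linear); A applies crc32 to every word.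

-- ===== PORT A =====
def crc32p (word : Int) : Int :=
  let step_1 := PySem.Int.bxor (word >>> (16:Int)) (PySem.Int.band word 0xFFFF)
  let step_2 := PySem.Int.bxor (step_1 >>> (8:Int)) (PySem.Int.band step_1 0xFF)
  PySem.Int.bxor (step_2 >>> (4:Int)) (PySem.Int.band step_2 0xF)

def crc323check (arr : List Int) : Bool :=
  let testvalue := PySem.Int.band ((PySem.List.pyGetD arr (-1) 0) >>> (26:Int)) 0xF
  let crc0 := crc32p (PySem.List.pyGetD arr 0 0)
  let crc := (PySem.List.pyRange 1 arr.length 1).foldl (fun crc i =>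
    if i ≠ (arr.length : Int) - 1 then
      PySem.Int.bxor (crc32p (PySem.List.pyGetD arr i 0)) crc
    else
      PySem.Int.bxor (crc32p (PySem.Int.band (PySem.List.pyGetD arr i 0) 0x3FFFFFF + 0xC0000000)) crc) crc0
  crc == testvalue

-- ===== PORT B =====
def crc323check_alt (arr : List Int) : Bool :=
  let last := PySem.List.pyGetD arr (-1) 0
  let testvalue := PySem.Int.band (last >>> (26:Int)) 0xF
  let acc0 := PySem.List.pyGetD arr 0 0
  let acc := if 1 < arr.length then
      PySem.Int.bxor ((PySem.List.slice arr (some 1) (some (-1))).foldl (fun a w => PySem.Int.bxor a w) acc0)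
        (PySem.Int.band last 0x3FFFFFF + 0xC0000000)
    else acc0
  crc32p acc == testvalue

-- ===== PRECONDITION & SPEC =====
-- Pre_ excludes only the empty list, on which both Pythons raise IndexError (arr[-1]).
def Pre_crc323check (arr : List Int) : Prop := arr ≠ []
instance (arr : List Int) : Decidable (Pre_crc323check arr) := by unfold Pre_crc323check; infer_instance
def pvWitness_crc323check : List Int := ([5, 17, -3])

def Spec_crc323check (arr : List Int) (out : Bool) : Prop := out = crc323check_alt arr
instance (arr : List Int) (out : Bool) : Decidable (Spec_crc323check arr out) := by unfold Spec_crc323check; infer_instance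

-- ===== CLAIM (what is proved, stated in full; the proofs are below) =====
def Claim_equal_crc323check : Prop := ∀ (arr : List Int), Dom_crc323check arr → Pre_crc323check arr → Spec_crc323check arr (crc323check arr)

-- ===== LEMMAS AND PROOFS =====

-- constructor-level equations for PySem.Int.bxor / PySem.Int.band (nonnegative mask)
theorem bxor_cast_cast (m n : Nat) : PySem.Int.bxor (m:Int) (n:Int) = ((m ^^^ n : Nat) : Int) := by
  simp [PySem.Int.bxor]

theorem bxor_cast_negSucc (m n : Nat) : PySem.Int.bxor (m:Int) (Int.negSucc n) = Int.negSucc (m ^^^ n) := by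
  simp only [PySem.Int.bxor]
  rw [if_pos (by omega), if_neg (by omega)]
  have h1 : (-(Int.negSucc n) - 1).toNat = n := by simp [Int.negSucc_eq]
  rw [h1, show ((m:Int)).toNat = m from rfl, Int.negSucc_eq]; ring

theorem bxor_negSucc_cast (m n : Nat) : PySem.Int.bxor (Int.negSucc m) (n:Int) = Int.negSucc (m ^^^ n) := by
  simp only [PySem.Int.bxor]
  rw [if_neg (by omega), if_pos (by omega)]
  have h1 : (-(Int.negSucc m) - 1).toNat = m := by simp [Int.negSucc_eq]
  rw [h1, show ((n:Int)).toNat = n from rfl, Int.negSucc_eq]; ring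

theorem bxor_negSucc_negSucc (m n : Nat) : PySem.Int.bxor (Int.negSucc m) (Int.negSucc n) = ((m ^^^ n : Nat) : Int) := by
  simp only [PySem.Int.bxor]
  rw [if_neg (by omega), if_neg (by omega)]
  have h1 : (-(Int.negSucc m) - 1).toNat = m := by simp [Int.negSucc_eq]
  have h2 : (-(Int.negSucc n) - 1).toNat = n := by simp [Int.negSucc_eq]
  rw [h1, h2]

theorem band_cast_mask (m M : Nat) : PySem.Int.band (m:Int) (M:Int) = ((m &&& M : Nat) : Int) := by
  simp only [PySem.Int.band]
  rw [if_pos (by omega), if_pos (by omega)]; rfl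

theorem band_negSucc_mask (n M : Nat) : PySem.Int.band (Int.negSucc n) (M:Int) = ((M - (M &&& n) : Nat) : Int) := by
  simp only [PySem.Int.band]
  rw [if_neg (by omega), if_pos (by omega)]
  have h1 : (-(Int.negSucc n) - 1).toNat = n := by simp [Int.negSucc_eq]
  rw [h1, show ((M:Int)).toNat = M from rfl]

theorem and_mod_two (a b : Nat) : (a &&& b) % 2 = a % 2 &&& b % 2 := by
  rw [← Nat.and_one_is_mod, ← Nat.and_one_is_mod, ← Nat.and_one_is_mod,
      Nat.and_assoc, Nat.and_assoc, Nat.and_comm 1 (b &&& 1), Nat.and_assoc, Nat.and_one_is_mod,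
      Nat.and_one_is_mod]
  norm_num

-- a bitwise submask subtracts as it XORs
theorem sub_and_eq_xor (M x : Nat) : M - (M &&& x) = M ^^^ (M &&& x) := by
  induction M using Nat.strong_induction_on generalizing x with
  | _ M ih =>
    rcases Nat.eq_zero_or_pos M with rfl | hM
    · simp
    · have hdiv : (M &&& x) / 2 = M / 2 &&& x / 2 := by
        simpa [Nat.shiftRight_one] using (Nat.shiftRight_and_distrib (a:=M) (b:=x) (i:=1))
      have hmod : (M &&& x) % 2 = M % 2 &&& x % 2 := and_mod_two M x
      have ihx := ih (M/2) (Nat.div_lt_self hM (by norm_num)) (x/2)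
      have hxdiv : (M ^^^ (M &&& x)) / 2 = M/2 ^^^ ((M &&& x)/2) := by
        simpa [Nat.shiftRight_one] using (Nat.shiftRight_xor_distrib (a:=M) (b:=M&&&x) (i:=1))
      have hxmod : (M ^^^ (M &&& x)) % 2 = (M + (M &&& x)) % 2 := Nat.xor_mod_two_eq
      have hb2 : (M/2 &&& x/2) ≤ M/2 := Nat.and_le_left
      have hm2 : M % 2 &&& x % 2 ≤ M % 2 := Nat.and_le_left
      rw [hdiv] at hxdiv
      omega

theorem bxor_assoc (a b c : Int) : PySem.Int.bxor (PySem.Int.bxor a b) c = PySem.Int.bxor a (PySem.Int.bxor b c) := by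
  cases a <;> cases b <;> cases c <;>
    simp [Int.ofNat_eq_natCast, bxor_cast_cast, bxor_cast_negSucc, bxor_negSucc_cast,
      bxor_negSucc_negSucc, Nat.xor_assoc]

-- shifts distribute over bxor
theorem bxor_shiftRight (a b : Int) (k : Nat) :
    (PySem.Int.bxor a b) >>> (k : Int) = PySem.Int.bxor (a >>> (k : Int)) (b >>> (k : Int)) := by
  cases a with
  | ofNat m => cases b with
    | ofNat n =>
        rw [Int.ofNat_eq_natCast, Int.ofNat_eq_natCast, bxor_cast_cast,
          Int.shiftRight_natCast, Int.shiftRight_natCast, Int.shiftRight_natCast, bxor_cast_cast,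
          Nat.shiftRight_xor_distrib]
    | negSucc n =>
        rw [Int.ofNat_eq_natCast, bxor_cast_negSucc, Int.shiftRight_negSucc,
          Int.shiftRight_natCast, Int.shiftRight_negSucc, bxor_cast_negSucc,
          Nat.shiftRight_xor_distrib]
  | negSucc m => cases b with
    | ofNat n =>
        rw [Int.ofNat_eq_natCast, bxor_negSucc_cast, Int.shiftRight_negSucc,
          Int.shiftRight_negSucc, Int.shiftRight_natCast, bxor_negSucc_cast,
          Nat.shiftRight_xor_distrib]
    | negSucc n =>
        rw [bxor_negSucc_negSucc, Int.shiftRight_natCast, Int.shiftRight_negSucc,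
          Int.shiftRight_negSucc, bxor_negSucc_negSucc, Nat.shiftRight_xor_distrib]

-- masking with a nonnegative mask distributes over bxor
theorem bxor_band_mask (a b : Int) (M : Nat) :
    PySem.Int.band (PySem.Int.bxor a b) (M : Int) =
      PySem.Int.bxor (PySem.Int.band a (M : Int)) (PySem.Int.band b (M : Int)) := by
  cases a with
  | ofNat m => cases b with
    | ofNat n =>
        rw [Int.ofNat_eq_natCast, Int.ofNat_eq_natCast, bxor_cast_cast, band_cast_mask,
          band_cast_mask, band_cast_mask, bxor_cast_cast, Nat.and_xor_distrib_right]
    | negSucc n =>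
        rw [Int.ofNat_eq_natCast, bxor_cast_negSucc, band_negSucc_mask, band_cast_mask,
          band_negSucc_mask, bxor_cast_cast]
        congr 1
        rw [sub_and_eq_xor, sub_and_eq_xor, Nat.and_xor_distrib_left, Nat.and_comm m M]
        ac_rfl
  | negSucc m => cases b with
    | ofNat n =>
        rw [Int.ofNat_eq_natCast, bxor_negSucc_cast, band_negSucc_mask, band_negSucc_mask,
          band_cast_mask, bxor_cast_cast]
        congr 1
        rw [sub_and_eq_xor, sub_and_eq_xor, Nat.and_xor_distrib_left, Nat.and_comm n M]
        ac_rfl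
    | negSucc n =>
        rw [bxor_negSucc_negSucc, band_cast_mask, band_negSucc_mask, band_negSucc_mask,
          bxor_cast_cast]
        congr 1
        rw [sub_and_eq_xor, sub_and_eq_xor, Nat.and_xor_distrib_right, Nat.and_comm m M,
          Nat.and_comm n M]
        have h : M ^^^ M &&& m ^^^ (M ^^^ M &&& n) = (M ^^^ M) ^^^ (M &&& m ^^^ M &&& n) := by ac_rfl
        rw [h, Nat.xor_self, Nat.zero_xor]

theorem bxor_xor4 (p q r t : Int) :
    PySem.Int.bxor (PySem.Int.bxor p q) (PySem.Int.bxor r t) =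
      PySem.Int.bxor (PySem.Int.bxor p r) (PySem.Int.bxor q t) := by
  rw [bxor_assoc, ← bxor_assoc q r t, PySem.Int.bxor_comm q r, bxor_assoc r q t, ← bxor_assoc]

theorem stage_lin (k M : Nat) (a b : Int) :
    PySem.Int.bxor ((PySem.Int.bxor a b) >>> ((k:Nat):Int)) (PySem.Int.band (PySem.Int.bxor a b) ((M:Nat):Int)) =
      PySem.Int.bxor (PySem.Int.bxor (a >>> ((k:Nat):Int)) (PySem.Int.band a ((M:Nat):Int)))
        (PySem.Int.bxor (b >>> ((k:Nat):Int)) (PySem.Int.band b ((M:Nat):Int))) := by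
  rw [bxor_shiftRight, bxor_band_mask, bxor_xor4]

-- crc32 is XOR-linear
theorem crc32p_bxor (a b : Int) : crc32p (PySem.Int.bxor a b) = PySem.Int.bxor (crc32p a) (crc32p b) := by
  simp only [crc32p]
  have h1 := stage_lin 16 65535 a b
  norm_num at h1
  rw [h1]
  have h2 := stage_lin 8 255 (PySem.Int.bxor (a >>> (16:Int)) (PySem.Int.band a 65535))
    (PySem.Int.bxor (b >>> (16:Int)) (PySem.Int.band b 65535))
  norm_num at h2
  rw [h2]
  have h3 := stage_lin 4 15
    (PySem.Int.bxor ((PySem.Int.bxor (a >>> (16:Int)) (PySem.Int.band a 65535)) >>> (8:Int))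
      (PySem.Int.band (PySem.Int.bxor (a >>> (16:Int)) (PySem.Int.band a 65535)) 255))
    (PySem.Int.bxor ((PySem.Int.bxor (b >>> (16:Int)) (PySem.Int.band b 65535)) >>> (8:Int))
      (PySem.Int.band (PySem.Int.bxor (b >>> (16:Int)) (PySem.Int.band b 65535)) 255))
  norm_num at h3
  rw [h3]

theorem crc32p_foldl_bxor (mid : List Int) (acc : Int) :
    crc32p (mid.foldl (fun a w => PySem.Int.bxor a w) acc) =
      mid.foldl (fun c w => PySem.Int.bxor (crc32p w) c) (crc32p acc) := by
  induction mid generalizing acc with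
  | nil => rfl
  | cons w ws ih =>
      simp only [List.foldl]
      rw [ih, crc32p_bxor, PySem.Int.bxor_comm]

theorem pyGetD_last (x z : Int) (mid : List Int) :
    PySem.List.pyGetD (x :: (mid ++ [z])) (-1) 0 = z := by
  simp [PySem.List.pyGetD, PySem.List.pyGet?, PySem.List.pyIdx?]

theorem pyGetD_head (x : Int) (xs : List Int) : PySem.List.pyGetD (x :: xs) 0 0 = x := by
  simp [PySem.List.pyGetD, PySem.List.pyGet?, PySem.List.pyIdx?]

theorem slice_mid (x z : Int) (mid : List Int) :
    PySem.List.slice (x :: (mid ++ [z])) (some 1) (some (-1)) = mid := by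
  simp [PySem.List.slice, PySem.List.clampIdx]
  rw [if_neg (by omega)]
  simp

theorem pyGetD_mid (x z : Int) (mid : List Int) (i : Int) (h1 : 1 ≤ i) (h2 : i < (mid.length:Int)+1) :
    PySem.List.pyGetD (x :: (mid ++ [z])) i 0 = PySem.List.pyGetD (x :: mid) i 0 := by
  obtain ⟨k, rfl⟩ : ∃ k : Nat, i = (k:Int) := ⟨i.toNat, by omega⟩
  rw [PySem.List.pyGetD_natCast, PySem.List.pyGetD_natCast]
  have hk : k < (x :: mid).length := by simp; omega
  rw [List.getD_eq_getElem?_getD, List.getD_eq_getElem?_getD]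
  rw [show (x :: (mid ++ [z])) = (x :: mid) ++ [z] by simp]
  rw [List.getElem?_append_left hk]

theorem pyGetD_lastIdx (x z : Int) (mid : List Int) :
    PySem.List.pyGetD (x :: (mid ++ [z])) ((mid.length:Int)+1) 0 = z := by
  have : ((mid.length:Int)+1) = (((mid.length+1:Nat)):Int) := by push_cast; ring
  rw [this, PySem.List.pyGetD_natCast]
  rw [show (x :: (mid ++ [z])) = (x :: mid) ++ [z] by simp]
  rw [List.getD_eq_getElem?_getD]
  rw [show mid.length + 1 = (x :: mid).length by simp]
  simp

-- ===== VERDICT (by name: the statement is the Claim_ definition above) =====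
theorem crc323check_spec : Claim_equal_crc323check := by
  intro arr _ hpre
  unfold Spec_crc323check
  match arr, hpre with
  | x :: xs, _ =>
    rcases xs.eq_nil_or_concat with rfl | ⟨mid, z, rfl⟩
    · simp [crc323check, crc323check_alt,
        PySem.List.pyGetD, PySem.List.pyGet?, PySem.List.pyIdx?,
        PySem.List.pyRange_one_eq_nil]
    · simp only [List.concat_eq_append]
      simp only [crc323check, crc323check_alt]
      simp only [pyGetD_last, pyGetD_head, slice_mid]
      have hlen : ((x :: (mid ++ [z])).length : Int) = (mid.length:Int) + 2 := by simp; ring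
      set N : Int := (mid.length : Int) with hN
      have hif : 1 < (x :: (mid ++ [z])).length := by simp
      rw [if_pos hif]
      -- A side: split the range
      have hsplit : PySem.List.pyRange 1 ((x :: (mid ++ [z])).length : Int) 1
          = PySem.List.pyRange 1 (N+1) 1 ++ [N+1] := by
        rw [hlen, show N + 2 = (N+1)+1 by ring]
        exact PySem.List.pyRange_one_succ_right (by omega)
      rw [hsplit, List.foldl_append]
      simp only [List.foldl]
      rw [hlen]
      rw [if_neg (by omega)]
      rw [show N + 2 - 1 = N + 1 by ring]
      have hcongr : (PySem.List.pyRange 1 (N+1) 1).foldl (fun crc i =>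
          if i ≠ N + 1 then
            PySem.Int.bxor (crc32p (PySem.List.pyGetD (x :: (mid ++ [z])) i 0)) crc
          else
            PySem.Int.bxor (crc32p (PySem.Int.band (PySem.List.pyGetD (x :: (mid ++ [z])) i 0) 0x3FFFFFF + 0xC0000000)) crc)
          (crc32p x)
          = (PySem.List.pyRange 1 (N+1) 1).foldl (fun crc i =>
            PySem.Int.bxor (crc32p (PySem.List.pyGetD (x :: mid) i 0)) crc) (crc32p x) := by
        apply PySem.List.foldl_congr_mem
        intro acc i hi
        rw [PySem.List.mem_pyRange_one] at hi
        rw [if_pos (by omega), pyGetD_mid x z mid i (by omega) (by omega)]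
      rw [hcongr]
      have hlen2 : (((x :: mid).length : Nat) : Int) = N + 1 := by simp; ring
      rw [← hlen2]
      rw [PySem.List.foldl_pyRange_pyGetD' (x :: mid) 0 (fun c w => PySem.Int.bxor (crc32p w) c) (crc32p x) (by omega)]
      rw [show ((1:Int)).toNat = 1 from rfl]
      rw [show List.drop 1 (x :: mid) = mid from rfl]
      rw [hlen2, pyGetD_lastIdx]
      -- B side
      rw [crc32p_bxor, crc32p_foldl_bxor]
      rw [PySem.Int.bxor_comm]
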